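-- pv_equiv track=rewrite | github.com/hpnog/computingProblems | leetCodeSolutionsPython/tests/test_wiggleSort_ii.py | checkWave
-- ===== SOURCE A (Python) =====
-- def checkWave(arg: [int]) -> bool:
--     low = True
--     for i in range(len(arg)):
--         if low:
--             if i > 0 and arg[i-1] <= arg[i]:
--                 return False
--             if i < (len(arg) - 1) and arg[i+1] <= arg[i]:
--                 return False
--         else:
--             if i > 0 and arg[i-1] >= arg[i]:
--                 return False
--             if i < (len(arg) - 1) and arg[i+1] >= arg[i]:
--                 return False
--         low = not low
--     return True
-- ===== SOURCE B (Python) =====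
-- def checkWave(arg: [int]) -> bool:
--     up = True
--     for x, y in zip(arg, arg[1:]):
--         if up:
--             if not x < y:
--                 return False
--         else:
--             if not x > y:
--                 return False
--         up = not up
--     return True
-- ===== Notes on version B (the rewrite author's own statement) =====
-- stated objective: simpler
-- what changed: B makes one strict comparison per adjacent pair with a flipping direction flag (zip over consecutive pairs), instead of A's index loop that re-checks every element against both of its neighbours, so each pair is tested once rather than twice and all index arithmetic disappears.
import Mathlib
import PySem

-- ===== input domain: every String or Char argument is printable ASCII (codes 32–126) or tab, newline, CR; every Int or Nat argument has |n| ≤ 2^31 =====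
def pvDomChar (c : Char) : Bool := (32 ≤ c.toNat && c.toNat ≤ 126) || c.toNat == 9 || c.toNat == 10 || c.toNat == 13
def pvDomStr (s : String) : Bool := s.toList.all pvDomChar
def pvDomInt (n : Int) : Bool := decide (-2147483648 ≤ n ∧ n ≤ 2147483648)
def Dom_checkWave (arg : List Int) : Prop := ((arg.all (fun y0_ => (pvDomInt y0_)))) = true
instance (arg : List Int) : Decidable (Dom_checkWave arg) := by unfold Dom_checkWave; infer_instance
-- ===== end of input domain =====

-- B replaces A's per-index both-neighbour checks by one strict comparison per adjacent
-- pair with a flipping direction flag (objective: simpler; same O(n) cost).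


-- ===== PORT A =====
-- loop body over the remaining indices of range(len(arg)); early 'return False' is the
-- literal 'false' result.  arg[i-1]/arg[i]/arg[i+1] are only read under the guards
-- i > 0 / i < len-1 / i ∈ range(len), so every pyGetD index is in range (default unused).
def checkWaveGo (arg : List Int) : List Int → Bool → Bool
  | [], _ => true
  | i :: is, low =>
    if low then
      if i > 0 ∧ PySem.List.pyGetD arg (i - 1) 0 ≤ PySem.List.pyGetD arg i 0 then false
      else if i < (arg.length : Int) - 1 ∧ PySem.List.pyGetD arg (i + 1) 0 ≤ PySem.List.pyGetD arg i 0 then false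
      else checkWaveGo arg is (!low)
    else
      if i > 0 ∧ PySem.List.pyGetD arg (i - 1) 0 ≥ PySem.List.pyGetD arg i 0 then false
      else if i < (arg.length : Int) - 1 ∧ PySem.List.pyGetD arg (i + 1) 0 ≥ PySem.List.pyGetD arg i 0 then false
      else checkWaveGo arg is (!low)

def checkWave (arg : List Int) : Bool :=
  checkWaveGo arg (PySem.List.pyRange 0 (arg.length : Int) 1) true

-- ===== PORT B =====
-- 'for x, y in zip(arg, arg[1:])' with flag up; early 'return False' is 'false'.
def checkWaveAltGo : Bool → List Int → Bool
  | _, [] => true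
  | _, [_] => true
  | up, x :: y :: l =>
    if up then
      if x < y then checkWaveAltGo (!up) (y :: l) else false
    else
      if y < x then checkWaveAltGo (!up) (y :: l) else false

def checkWave_alt (arg : List Int) : Bool :=
  checkWaveAltGo true arg

-- ===== PRECONDITION & SPEC =====
def Spec_checkWave (arg : List Int) (out : Bool) : Prop := out = checkWave_alt arg
instance (arg : List Int) (out : Bool) : Decidable (Spec_checkWave arg out) := by unfold Spec_checkWave; infer_instance

-- ===== CLAIM (what is proved, stated in full; the proofs are below) =====
def Claim_equal_checkWave : Prop := ∀ (arg : List Int), Dom_checkWave arg → Spec_checkWave arg (checkWave arg)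

-- ===== LEMMAS AND PROOFS =====

-- Invariant: by the time A's loop enters index k > 0 the pair (arg[k-1], arg[k]) already
-- satisfies the strict relation of parity k, so A's backward check never fires and the
-- forward check coincides with B's single pair check.
lemma checkWaveGo_eq (arg : List Int) (n : Nat) :
    ∀ k : Nat, arg.length - k = n → k ≤ arg.length →
    (0 < k → ∀ h2 : k < arg.length,
      if k % 2 = 0 then arg[k] < arg[k - 1]'(by omega) else arg[k - 1]'(by omega) < arg[k]) →
    checkWaveGo arg (PySem.List.pyRange (k : Int) (arg.length : Int) 1) (decide (k % 2 = 0))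
      = checkWaveAltGo (decide (k % 2 = 0)) (arg.drop k) := by
  induction n with
  | zero =>
    intro k hfuel hk _
    have hke : k = arg.length := by omega
    subst hke
    rw [PySem.List.pyRange_one_eq_nil (by omega), List.drop_length]
    simp [checkWaveGo, checkWaveAltGo]
  | succ m ih =>
    intro k hfuel hk hinv
    have hklt : k < arg.length := by omega
    have hgk : PySem.List.pyGetD arg (k : Int) 0 = arg[k] := by
      rw [PySem.List.pyGetD_eq_getElem arg (i := (k : Int)) 0 (by omega) (by omega)]
      simp
    have hgk1 : ∀ (h : k + 1 < arg.length), PySem.List.pyGetD arg ((k : Int) + 1) 0 = arg[k + 1]'h := by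
      intro h
      rw [PySem.List.pyGetD_eq_getElem arg (i := (k : Int) + 1) 0 (by omega) (by omega)]
      all_goals (congr 1 <;> omega)
    have hgkm : ∀ (h : 0 < k), PySem.List.pyGetD arg ((k : Int) - 1) 0 = arg[k - 1]'(by omega) := by
      intro h
      rw [PySem.List.pyGetD_eq_getElem arg (i := (k : Int) - 1) 0 (by omega) (by omega)]
      congr 1
      omega
    rw [PySem.List.pyRange_one_cons (by exact_mod_cast hklt),
        List.drop_eq_getElem_cons hklt]
    by_cases hp : k % 2 = 0
    · -- low = true at even k
      have hlow : decide (k % 2 = 0) = true := by simp [hp]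
      have hback : ¬((k : Int) > 0 ∧ PySem.List.pyGetD arg ((k : Int) - 1) 0 ≤ PySem.List.pyGetD arg (k : Int) 0) := by
        rintro ⟨hpos, hle⟩
        have hk0 : 0 < k := by omega
        have hi := hinv hk0 hklt
        rw [if_pos hp] at hi
        rw [hgkm hk0, hgk] at hle
        omega
      rw [hlow]
      simp only [checkWaveGo, if_true]
      rw [if_neg hback]
      by_cases hnext : k + 1 < arg.length
      · rw [List.drop_eq_getElem_cons hnext]
        by_cases hcmp : arg[k] < arg[k + 1]'(by omega)
        · -- forward check passes: both recurse
          rw [if_neg (by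
            rintro ⟨_, hle⟩
            rw [hgk1 hnext, hgk] at hle
            omega)]
          have ihk := ih (k + 1) (by omega) (by omega) (by
            intro _ h2
            rw [if_neg (by omega)]
            simpa using hcmp)
          rw [show ((k + 1 : Nat) : Int) = (k : Int) + 1 by push_cast; ring,
              show decide ((k + 1) % 2 = 0) = false by simp; omega,
              List.drop_eq_getElem_cons hnext] at ihk
          simp only [checkWaveAltGo, if_true]
          rw [if_pos hcmp, Bool.not_true]
          exact ihk
        · -- forward check fails: both sides false
          rw [if_pos (by
              refine ⟨by omega, ?_⟩
              rw [hgk1 hnext, hgk]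
              omega)]
          simp only [checkWaveAltGo, if_true]
          rw [if_neg hcmp]
      · -- k is the last index
        have hdrop : arg.drop (k + 1) = [] := List.drop_eq_nil_of_le (by omega)
        rw [if_neg (by rintro ⟨hlt, _⟩; omega),
            PySem.List.pyRange_one_eq_nil (by omega), hdrop]
        simp [checkWaveGo, checkWaveAltGo]
    · -- low = false at odd k
      have hlow : decide (k % 2 = 0) = false := by simp [hp]
      have hback : ¬((k : Int) > 0 ∧ PySem.List.pyGetD arg ((k : Int) - 1) 0 ≥ PySem.List.pyGetD arg (k : Int) 0) := by
        rintro ⟨hpos, hle⟩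
        have hk0 : 0 < k := by omega
        have hi := hinv hk0 hklt
        rw [if_neg hp] at hi
        rw [hgkm hk0, hgk] at hle
        omega
      rw [hlow]
      simp only [checkWaveGo, Bool.false_eq_true, if_false]
      rw [if_neg hback]
      by_cases hnext : k + 1 < arg.length
      · rw [List.drop_eq_getElem_cons hnext]
        by_cases hcmp : arg[k + 1]'(by omega) < arg[k]
        · rw [if_neg (by
            rintro ⟨_, hle⟩
            rw [hgk1 hnext, hgk] at hle
            omega)]
          have ihk := ih (k + 1) (by omega) (by omega) (by
            intro _ h2
            rw [if_pos (by omega)]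
            simpa using hcmp)
          rw [show ((k + 1 : Nat) : Int) = (k : Int) + 1 by push_cast; ring,
              show decide ((k + 1) % 2 = 0) = true by simp; omega,
              List.drop_eq_getElem_cons hnext] at ihk
          simp only [checkWaveAltGo, Bool.false_eq_true, if_false]
          rw [if_pos hcmp, Bool.not_false]
          exact ihk
        · rw [if_pos (by
              refine ⟨by omega, ?_⟩
              rw [hgk1 hnext, hgk]
              omega)]
          simp only [checkWaveAltGo, Bool.false_eq_true, if_false]
          rw [if_neg hcmp]
      · have hdrop : arg.drop (k + 1) = [] := List.drop_eq_nil_of_le (by omega)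
        rw [if_neg (by rintro ⟨hlt, _⟩; omega),
            PySem.List.pyRange_one_eq_nil (by omega), hdrop]
        simp [checkWaveGo, checkWaveAltGo]

theorem checkWave_spec : Claim_equal_checkWave := by
  intro arg _
  unfold Spec_checkWave checkWave checkWave_alt
  have := checkWaveGo_eq arg arg.length 0 (by omega) (by omega) (by omega)
  simpa using this
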